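-- pv_equiv track=rewrite | github.com/MeetWithAnkita/Basic_Python | Assignment04/16.py | tribonacci_in_range
-- ===== SOURCE A (Python) =====
-- def tribonacci_in_range(start, end):
--     tribonacci = [1, 1, 2]
--     while True:
--         next_trib = tribonacci[-1] + tribonacci[-2] + tribonacci[-3]
--         if next_trib > end:
--             break
--         tribonacci.append(next_trib)
--     return [num for num in tribonacci if start <= num <= end]
-- ===== SOURCE B (Python) =====
-- # All tribonacci numbers that can lie in a 32-bit range, plus one sentinel term
-- # above 2^31; the sequence is sorted, so a range query is a contiguous window.
-- TRIB = [1, 1, 2, 4, 7, 13, 24, 44, 81, 149, 274, 504, 927, 1705, 3136, 5768,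
--         10609, 19513, 35890, 66012, 121415, 223317, 410744, 755476, 1389537,
--         2555757, 4700770, 8646064, 15902591, 29249425, 53798080, 98950096,
--         181997601, 334745777, 615693474, 1132436852, 2082876103, 3831006429]
--
--
-- def tribonacci_in_range(start, end):
--     tail = TRIB
--     while tail and tail[0] < start:
--         tail = tail[1:]
--     res = []
--     for t in tail:
--         if t > end:
--             break
--         res.append(t)
--     return res
-- ===== Notes on version B (the rewrite author's own statement) =====
-- stated objective: alternative
-- what changed: B does no generation at runtime: it answers the range query from a fixed sorted table of the 38 tribonacci numbers reaching past 2^31 (enough for the 32-bit input domain), dropping the prefix below start and taking the contiguous window of terms <= end, instead of A's grow-a-list-with-negative-indexing loop followed by a filtering comprehension.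
import Mathlib
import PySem

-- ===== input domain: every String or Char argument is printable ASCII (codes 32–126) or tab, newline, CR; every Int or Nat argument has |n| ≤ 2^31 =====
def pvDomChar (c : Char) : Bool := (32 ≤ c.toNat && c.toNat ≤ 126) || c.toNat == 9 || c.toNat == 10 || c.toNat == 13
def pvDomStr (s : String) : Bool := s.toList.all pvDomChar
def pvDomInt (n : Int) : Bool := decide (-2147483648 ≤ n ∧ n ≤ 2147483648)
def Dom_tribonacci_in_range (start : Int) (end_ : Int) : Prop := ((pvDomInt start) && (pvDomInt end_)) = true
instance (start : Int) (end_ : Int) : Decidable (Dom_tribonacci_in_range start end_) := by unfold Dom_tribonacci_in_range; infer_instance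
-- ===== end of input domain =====

-- B answers the range query from a fixed sorted table of the 38 tribonacci numbers reaching
-- past 2^31 (enough for the stated 32-bit domain): drop the prefix below `start`, take the
-- window of terms ≤ `end` — no runtime generation, unlike A's grow-and-filter (objective: alternative).


-- ===== PORT A =====
-- A's `while True` loop; the tribonacci terms at least double every two steps, so on the
-- stated domain (end ≤ 2^31) 100 iterations are more than the loop ever runs (fuel is a
-- totality guard only, never reached before the break).
def tribLoopA (end_ : Int) : Nat → List Int → List Int
  | 0, tribonacci => tribonacci
  | fuel + 1, tribonacci =>
    let next_trib := PySem.List.pyGetD tribonacci (-1) 0 + PySem.List.pyGetD tribonacci (-2) 0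
      + PySem.List.pyGetD tribonacci (-3) 0
    if next_trib > end_ then tribonacci
    else tribLoopA end_ fuel (tribonacci ++ [next_trib])

def tribonacci_in_range (start : Int) (end_ : Int) : List Int :=
  (tribLoopA end_ 100 [1, 1, 2]).filter (fun num => decide (start ≤ num ∧ num ≤ end_))

-- ===== PORT B =====
def tribTable : List Int :=
  [1, 1, 2, 4, 7, 13, 24, 44, 81, 149, 274, 504, 927, 1705, 3136, 5768,
   10609, 19513, 35890, 66012, 121415, 223317, 410744, 755476, 1389537,
   2555757, 4700770, 8646064, 15902591, 29249425, 53798080, 98950096,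
   181997601, 334745777, 615693474, 1132436852, 2082876103, 3831006429]

-- `while tail and tail[0] < start: tail = tail[1:]` — the list shrinks by one each pass
def dropLoopB (start : Int) : List Int → List Int
  | [] => []
  | t :: ts => if t < start then dropLoopB start ts else t :: ts

-- `for t in tail: if t > end: break; res.append(t)` — building res front-to-back
def takeLoopB (end_ : Int) : List Int → List Int
  | [] => []
  | t :: ts => if t > end_ then [] else t :: takeLoopB end_ ts

def tribonacci_in_range_alt (start : Int) (end_ : Int) : List Int :=
  takeLoopB end_ (dropLoopB start tribTable)

-- ===== PRECONDITION & SPEC =====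
def Spec_tribonacci_in_range (start : Int) (end_ : Int) (out : List Int) : Prop := out = tribonacci_in_range_alt start end_
instance (start : Int) (end_ : Int) (out : List Int) : Decidable (Spec_tribonacci_in_range start end_ out) := by unfold Spec_tribonacci_in_range; infer_instance

-- ===== CLAIM (what is proved, stated in full; the proofs are below) =====
def Claim_equal_tribonacci_in_range : Prop := ∀ (start : Int) (end_ : Int), Dom_tribonacci_in_range start end_ → Spec_tribonacci_in_range start end_ (tribonacci_in_range start end_)

-- ===== LEMMAS AND PROOFS =====

-- `l` continues the tribonacci recurrence from the window (a, b, c)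
def tribChain : Int → Int → Int → List Int → Bool
  | _, _, _, [] => true
  | a, b, c, x :: xs => (x == a + b + c) && tribChain b c x xs

lemma last3_get (p : List Int) (a b c : Int) :
    PySem.List.pyGetD (p ++ [a, b, c]) (-1) 0 = c ∧
    PySem.List.pyGetD (p ++ [a, b, c]) (-2) 0 = b ∧
    PySem.List.pyGetD (p ++ [a, b, c]) (-3) 0 = a := by
  have hlen : (p ++ [a, b, c]).length = p.length + 3 := by simp
  refine ⟨?_, ?_, ?_⟩
  · rw [PySem.List.pyGetD_neg_ofNat _ 1 0 (by omega) (by omega)]; simp [hlen]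
  · rw [PySem.List.pyGetD_neg_ofNat _ 2 0 (by omega) (by omega)]; simp [hlen]
  · rw [PySem.List.pyGetD_neg_ofNat _ 3 0 (by omega) (by omega)]; simp [hlen]

-- A's loop, when the continuation `l` contains a term > end_, stops inside `l`:
-- it appends exactly the prefix of `l` of terms ≤ end_ (which is takeLoopB end_ l).
lemma loopA_eq (end_ : Int) :
    ∀ (l : List Int) (p : List Int) (a b c : Int) (fuel : Nat),
      tribChain a b c l = true → (∃ x ∈ l, x > end_) → l.length ≤ fuel →
      tribLoopA end_ fuel (p ++ [a, b, c]) = (p ++ [a, b, c]) ++ takeLoopB end_ l := by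
  intro l
  induction l with
  | nil => intro p a b c fuel _ hw _; simp at hw
  | cons x xs ih =>
    intro p a b c fuel hch hw hlen
    rw [tribChain, Bool.and_eq_true, beq_iff_eq] at hch
    obtain ⟨hx, hch'⟩ := hch
    obtain ⟨f, rfl⟩ : ∃ f, fuel = f + 1 := ⟨fuel - 1, by simp at hlen; omega⟩
    obtain ⟨h1, h2, h3⟩ := last3_get p a b c
    simp only [tribLoopA, h1, h2, h3]
    have hsum : c + b + a = x := by omega
    rw [hsum]
    by_cases hgt : x > end_
    · simp [hgt, takeLoopB]
    · simp only [hgt, if_false, takeLoopB]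
      have hre : (p ++ [a, b, c]) ++ [x] = (p ++ [a]) ++ [b, c, x] := by simp
      rw [hre, ih (p ++ [a]) b c x f hch'
        (by obtain ⟨w, hwmem, hwgt⟩ := hw
            refine ⟨w, ?_, hwgt⟩
            rcases List.mem_cons.mp hwmem with h | h
            · exact absurd (h ▸ hwgt) hgt
            · exact h)
        (by simp at hlen ⊢; omega)]
      simp

-- On a sorted list, dropping the prefix < start then taking terms ≤ end_ is exactly
-- filtering for start ≤ · ≤ end_.
lemma takeLoopB_eq_filter (start end_ : Int) :
    ∀ (l : List Int), l.Pairwise (· ≤ ·) →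
      takeLoopB end_ (dropLoopB start l)
        = l.filter (fun num => decide (start ≤ num ∧ num ≤ end_)) := by
  intro l
  induction l with
  | nil => intro _; rfl
  | cons x xs ih =>
    intro hs
    have hs' : xs.Pairwise (· ≤ ·) := hs.of_cons
    have hall : ∀ y ∈ xs, x ≤ y := fun y hy => List.rel_of_pairwise_cons hs hy
    by_cases hlt : x < start
    · have hnp : ¬ (start ≤ x ∧ x ≤ end_) := by omega
      rw [dropLoopB, if_pos hlt, List.filter_cons, if_neg (by simpa using hnp)]
      exact ih hs'
    · rw [dropLoopB, if_neg hlt]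
      by_cases hgt : x > end_
      · have hnil : xs.filter (fun num => decide (start ≤ num ∧ num ≤ end_)) = [] := by
          simp only [List.filter_eq_nil_iff, decide_eq_true_eq, not_and, not_le]
          intro y hy _
          have := hall y hy
          omega
        have hnp : ¬ (start ≤ x ∧ x ≤ end_) := by omega
        rw [takeLoopB, if_pos hgt, List.filter_cons, if_neg (by simpa using hnp), hnil]
      · have hrec := ih hs'
        have hdx : dropLoopB start xs = xs := by
          cases xs with
          | nil => rfl
          | cons y ys =>
            have hy : ¬ y < start := by have := hall y (by simp); omega
            rw [dropLoopB, if_neg hy]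
        rw [hdx] at hrec
        have hpx : (start ≤ x ∧ x ≤ end_) := by omega
        rw [takeLoopB, if_neg hgt, List.filter_cons, if_pos (by simpa using hpx), hrec]

-- Terms of takeLoopB beyond end_ are dropped; filtering them back in changes nothing
-- when the list is sorted.
lemma filter_takeLoopB (start end_ : Int) :
    ∀ (l : List Int), l.Pairwise (· ≤ ·) →
      (takeLoopB end_ l).filter (fun num => decide (start ≤ num ∧ num ≤ end_))
        = l.filter (fun num => decide (start ≤ num ∧ num ≤ end_)) := by
  intro l
  induction l with
  | nil => intro _; rfl
  | cons x xs ih =>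
    intro hs
    have hs' : xs.Pairwise (· ≤ ·) := hs.of_cons
    have hall : ∀ y ∈ xs, x ≤ y := fun y hy => List.rel_of_pairwise_cons hs hy
    by_cases hgt : x > end_
    · have hnil : xs.filter (fun num => decide (start ≤ num ∧ num ≤ end_)) = [] := by
        simp only [List.filter_eq_nil_iff, decide_eq_true_eq, not_and, not_le]
        intro y hy _
        have := hall y hy
        omega
      have hnp : ¬ (start ≤ x ∧ x ≤ end_) := by omega
      rw [takeLoopB, if_pos hgt, List.filter_cons, if_neg (by simpa using hnp), hnil]
      rfl
    · rw [takeLoopB, if_neg hgt, List.filter_cons, List.filter_cons, ih hs']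

lemma tribTable_sorted : tribTable.Pairwise (· ≤ ·) := by decide

lemma tribDrop_sorted : (tribTable.drop 3).Pairwise (· ≤ ·) := by decide

-- ===== VERDICT (by name: the statement is the Claim_ definition above) =====
theorem tribonacci_in_range_spec : Claim_equal_tribonacci_in_range := by
  intro start end_ hdom
  have hend : end_ ≤ 2147483648 := by
    unfold Dom_tribonacci_in_range pvDomInt at hdom
    simp only [Bool.and_eq_true, decide_eq_true_eq] at hdom
    omega
  unfold Spec_tribonacci_in_range tribonacci_in_range tribonacci_in_range_alt
  have hrest : tribChain 1 1 2 (tribTable.drop 3) = true := by decide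
  have hw : ∃ x ∈ tribTable.drop 3, x > end_ :=
    ⟨3831006429, by decide, by omega⟩
  have hA := loopA_eq end_ (tribTable.drop 3) [] 1 1 2 100 hrest hw (by decide)
  simp only [List.nil_append] at hA
  rw [hA, takeLoopB_eq_filter start end_ tribTable tribTable_sorted,
    show tribTable = [1, 1, 2] ++ tribTable.drop 3 from rfl,
    List.filter_append, List.filter_append]
  congr 1
  exact filter_takeLoopB start end_ (tribTable.drop 3) tribDrop_sorted
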